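-- pv_equiv track=rewrite | github.com/calguard/Name-Deduplication-Python | nickname_generator.py | generate_phonetic_nicknames
-- ===== SOURCE A (Python) =====
-- from typing import List, Set, Dict, Optional, Tuple
--
-- def generate_phonetic_nicknames(token: str) -> Set[str]:
--     """Only allow conservative 'h'-pair changes: ch->k, th->t, ph->p, jh->j."""
--     n = token.lower()
--     out: Set[str] = set()
--     modified = n
--     phonetic_subs = {'ch': 'k', 'th': 't', 'ph': 'p', 'jh': 'j'}
--     for o, r in phonetic_subs.items():
--         if o in modified:
--             modified = modified.replace(o, r)
--     if modified != n and len(modified) >= 2: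
--         out.add(modified.capitalize())
--     return out
-- ===== SOURCE B (Python) =====
-- def generate_phonetic_nicknames(token: str) -> set:
--     """Only allow conservative 'h'-pair changes: ch->k, th->t, ph->p, jh->j.
--
--     Single left-to-right scan instead of four sequential global replaces.
--     """
--     n = token.lower()
--     table = {'c': 'k', 't': 't', 'p': 'p', 'j': 'j'}
--     pieces = []
--     i = 0
--     while i < len(n):
--         if i + 1 < len(n) and n[i + 1] == 'h' and n[i] in table:
--             pieces.append(table[n[i]])
--             i += 2
--         else:
--             pieces.append(n[i])
--             i += 1
--     m = ''.join(pieces)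
--     if m != n and len(m) >= 2:
--         return {m.capitalize()}
--     return set()
-- ===== Notes on version B (the rewrite author's own statement) =====
-- stated objective: alternative
-- what changed: Replaces the four sequential global str.replace passes with a single left-to-right scan that checks each 2-char window against all four h-pairs at once (valid because no substitution can create or destroy another pair).
import Mathlib
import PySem

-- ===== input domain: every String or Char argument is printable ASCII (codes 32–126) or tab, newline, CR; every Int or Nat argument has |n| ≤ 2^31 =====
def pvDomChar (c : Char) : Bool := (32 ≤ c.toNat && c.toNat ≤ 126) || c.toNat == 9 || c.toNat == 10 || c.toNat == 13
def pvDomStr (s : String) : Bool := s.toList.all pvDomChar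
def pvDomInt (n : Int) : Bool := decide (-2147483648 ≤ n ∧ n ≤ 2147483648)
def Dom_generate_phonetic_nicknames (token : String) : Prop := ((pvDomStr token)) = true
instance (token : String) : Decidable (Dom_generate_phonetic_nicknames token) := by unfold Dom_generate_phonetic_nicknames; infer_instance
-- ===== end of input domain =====

-- B replaces A's four sequential global str.replace passes by one left-to-right scan
-- over 2-char windows (objective: alternative decomposition); return value only, no mutation.

-- ===== PORT A =====
-- str.capitalize(): first char upper-cased, rest lower-cased (exact on ASCII; PySem has no capitalize)
def pvCapitalize (cs : List Char) : List Char :=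
  match cs with
  | [] => []
  | c :: rest => PySem.Chars.upperChar c :: PySem.Chars.lower rest

-- the dict phonetic_subs, iterated in insertion order
def pvPhoneticSubs : List (List Char × List Char) :=
  [(['c','h'], ['k']), (['t','h'], ['t']), (['p','h'], ['p']), (['j','h'], ['j'])]

def generate_phonetic_nicknames (token : String) : List String :=
  let n := PySem.Chars.lower token.toList
  let out : PySem.Set String := PySem.Set.empty
  let modified := pvPhoneticSubs.foldl
    (fun m pr => if PySem.Chars.isIn pr.1 m then PySem.Chars.replace m pr.1 pr.2 else m) n
  if modified ≠ n ∧ 2 ≤ modified.length then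
    PySem.Set.add out (String.ofList (pvCapitalize modified))
  else out

-- ===== PORT B =====
-- the dict table lookup of Source B: table[n[i]] when n[i+1] == 'h' and n[i] in table
def pvSub? (a b : Char) : Option Char :=
  if b = 'h' then
    if a = 'c' then some 'k'
    else if a = 't' then some 't'
    else if a = 'p' then some 'p'
    else if a = 'j' then some 'j'
    else none
  else none

-- the while loop of Source B: one left-to-right scan, advancing by 2 on a matched h-pair
def pvScan : List Char → List Char
  | [] => []
  | [a] => [a]
  | a :: b :: rest =>
    match pvSub? a b with
    | some r => r :: pvScan rest
    | none => a :: pvScan (b :: rest)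

def generate_phonetic_nicknames_alt (token : String) : List String :=
  let n := PySem.Chars.lower token.toList
  let m := pvScan n
  if m ≠ n ∧ 2 ≤ m.length then
    PySem.Set.ofList [String.ofList (pvCapitalize m)]
  else PySem.Set.empty

-- ===== PRECONDITION & SPEC =====
def Spec_generate_phonetic_nicknames (token : String) (out : List String) : Prop := out = generate_phonetic_nicknames_alt token
instance (token : String) (out : List String) : Decidable (Spec_generate_phonetic_nicknames token out) := by unfold Spec_generate_phonetic_nicknames; infer_instance

-- ===== CLAIM (what is proved, stated in full; the proofs are below) =====
def Claim_equal_generate_phonetic_nicknames : Prop := ∀ (token : String), Dom_generate_phonetic_nicknames token → Spec_generate_phonetic_nicknames token (generate_phonetic_nicknames token)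

-- ===== LEMMAS AND PROOFS =====

-- single-pattern scan: replace all non-overlapping occurrences of [x,'h'] by [r]
def pvRep (x r : Char) : List Char → List Char
  | a :: b :: rest => if a = x ∧ b = 'h' then r :: pvRep x r rest else a :: pvRep x r (b :: rest)
  | l => l

theorem pvRep_skip (x r a : Char) (l : List Char)
    (h : a ≠ x ∨ l.head? ≠ some 'h') : pvRep x r (a :: l) = a :: pvRep x r l := by
  cases l with
  | nil => rfl
  | cons b rest =>
    have : ¬ (a = x ∧ b = 'h') := by
      rcases h with h | h
      · rintro ⟨rfl, _⟩; exact h rfl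
      · rintro ⟨_, rfl⟩; exact h (by simp)
    simp [pvRep, this]

theorem pvRep_consume (x r : Char) (l : List Char) :
    pvRep x r (x :: 'h' :: l) = r :: pvRep x r l := by
  simp [pvRep]

theorem pvRep_head (x r : Char) (hr : r ≠ 'h') (l : List Char)
    (h : (pvRep x r l).head? = some 'h') : l.head? = some 'h' := by
  match l with
  | [] => simp [pvRep] at h
  | [a] => simpa [pvRep] using h
  | a :: b :: rest =>
    by_cases hc : a = x ∧ b = 'h'
    · simp [pvRep, hc] at h; exact absurd h hr
    · simp [pvRep, hc] at h; simp [h]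

theorem pvGo_eq_pvRep (x r : Char) :
    ∀ (fuel : Nat) (l acc : List Char), l.length ≤ fuel →
      PySem.Chars.replace.go [x, 'h'] [r] fuel l acc = acc.reverse ++ pvRep x r l := by
  intro fuel
  induction fuel with
  | zero =>
    intro l acc hl
    have : l = [] := by cases l <;> simp_all
    subst this
    simp [PySem.Chars.replace.go, pvRep]
  | succ fuel ih =>
    intro l acc hl
    match l with
    | [] => simp [PySem.Chars.replace.go, pvRep]
    | [a] =>
      have hpre : [x, 'h'].isPrefixOf [a] = false := by
        simp [List.isPrefixOf]
      rw [PySem.Chars.replace.go]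
      simp only [hpre, Bool.false_eq_true, if_false]
      rw [ih [] (a :: acc) (by simp)]
      simp [pvRep]
    | a :: b :: rest =>
      rw [PySem.Chars.replace.go]
      by_cases hc : a = x ∧ b = 'h'
      · have hpre : [x, 'h'].isPrefixOf (a :: b :: rest) = true := by
          simp [List.isPrefixOf, hc.1, hc.2]
        simp only [hpre, if_true]
        have hdrop : List.drop ([x, 'h'] : List Char).length (a :: b :: rest) = rest := rfl
        rw [hdrop, ih rest (([r] : List Char).reverse ++ acc) (by simp at hl ⊢; omega)]
        simp [pvRep, hc.1, hc.2]
      · have hpre : [x, 'h'].isPrefixOf (a :: b :: rest) = false := by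
          simp [List.isPrefixOf]; intro hax hbh; exact hc ⟨hax.symm, hbh.symm⟩
        simp only [hpre, Bool.false_eq_true, if_false]
        rw [ih (b :: rest) (a :: acc) (by simp at hl ⊢; omega)]
        simp [pvRep, hc]

theorem pvReplace_eq_pvRep (x r : Char) (l : List Char) :
    PySem.Chars.replace l [x, 'h'] [r] = pvRep x r l := by
  rw [PySem.Chars.replace]
  simp only [List.isEmpty_cons, Bool.false_eq_true, if_false]
  simpa using pvGo_eq_pvRep x r l.length l [] le_rfl

theorem pvRep_id_of_not_infix (x r : Char) (l : List Char)
    (h : ¬ [x, 'h'] <:+: l) : pvRep x r l = l := by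
  match l with
  | [] => rfl
  | [a] => rfl
  | a :: b :: rest =>
    have hc : ¬ (a = x ∧ b = 'h') := by
      rintro ⟨rfl, rfl⟩
      exact h ⟨[], rest, by simp⟩
    have htail : ¬ [x, 'h'] <:+: (b :: rest) := fun hi => h (List.infix_cons hi)
    simp [pvRep, hc, pvRep_id_of_not_infix x r (b :: rest) htail]

theorem pvGuard_eq_pvRep (x r : Char) (m : List Char) :
    (if PySem.Chars.isIn [x, 'h'] m then PySem.Chars.replace m [x, 'h'] [r] else m)
      = pvRep x r m := by
  by_cases h : PySem.Chars.isIn [x, 'h'] m = true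
  · simp [h, pvReplace_eq_pvRep]
  · have := (PySem.Chars.isIn_eq_false_iff _ _).mp (by simpa using h)
    simp [h, pvRep_id_of_not_infix x r m this]

theorem pvChain_eq_pvScan (l : List Char) :
    pvRep 'j' 'j' (pvRep 'p' 'p' (pvRep 't' 't' (pvRep 'c' 'k' l))) = pvScan l := by
  fun_induction pvScan l with
  | case1 => rfl
  | case2 a => rfl
  | case3 a b rest r hsub ih =>
    -- a matched h-pair: b = 'h' and a is one of c/t/p/j
    have hb : b = 'h' := by
      by_contra hb; simp [pvSub?, hb] at hsub
    subst hb
    by_cases hac : a = 'c'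
    · subst hac
      have hr : r = 'k' := by simpa [pvSub?] using hsub.symm
      subst hr
      rw [pvRep_consume]
      rw [pvRep_skip 't' 't' 'k' _ (Or.inl (by decide)),
          pvRep_skip 'p' 'p' 'k' _ (Or.inl (by decide)),
          pvRep_skip 'j' 'j' 'k' _ (Or.inl (by decide)), ih]
    · by_cases hat : a = 't'
      · subst hat
        have hr : r = 't' := by simpa [pvSub?] using hsub.symm
        subst hr
        rw [pvRep_skip 'c' 'k' 't' _ (Or.inl (by decide)),
            pvRep_skip 'c' 'k' 'h' _ (Or.inl (by decide)),
            pvRep_consume,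
            pvRep_skip 'p' 'p' 't' _ (Or.inl (by decide)),
            pvRep_skip 'j' 'j' 't' _ (Or.inl (by decide)), ih]
      · by_cases hap : a = 'p'
        · subst hap
          have hr : r = 'p' := by simpa [pvSub?] using hsub.symm
          subst hr
          rw [pvRep_skip 'c' 'k' 'p' _ (Or.inl (by decide)),
              pvRep_skip 'c' 'k' 'h' _ (Or.inl (by decide)),
              pvRep_skip 't' 't' 'p' _ (Or.inl (by decide)),
              pvRep_skip 't' 't' 'h' _ (Or.inl (by decide)),
              pvRep_consume,
              pvRep_skip 'j' 'j' 'p' _ (Or.inl (by decide)), ih]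
        · have haj : a = 'j' := by
            by_contra haj; simp [pvSub?, hac, hat, hap, haj] at hsub
          subst haj
          have hr : r = 'j' := by simpa [pvSub?] using hsub.symm
          subst hr
          rw [pvRep_skip 'c' 'k' 'j' _ (Or.inl (by decide)),
              pvRep_skip 'c' 'k' 'h' _ (Or.inl (by decide)),
              pvRep_skip 't' 't' 'j' _ (Or.inl (by decide)),
              pvRep_skip 't' 't' 'h' _ (Or.inl (by decide)),
              pvRep_skip 'p' 'p' 'j' _ (Or.inl (by decide)),
              pvRep_skip 'p' 'p' 'h' _ (Or.inl (by decide)),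
              pvRep_consume, ih]
  | case4 a b rest hsub ih =>
    -- no h-pair at this position
    have hno : ¬ (b = 'h' ∧ (a = 'c' ∨ a = 't' ∨ a = 'p' ∨ a = 'j')) := by
      rintro ⟨rfl, hA⟩
      rcases hA with rfl | rfl | rfl | rfl <;> simp [pvSub?] at hsub
    have hbh : b = 'h' → a ≠ 'c' ∧ a ≠ 't' ∧ a ≠ 'p' ∧ a ≠ 'j' := by
      intro hb
      refine ⟨?_, ?_, ?_, ?_⟩ <;> intro ha <;> exact hno ⟨hb, by simp [ha]⟩
    have h1 : pvRep 'c' 'k' (a :: b :: rest) = a :: pvRep 'c' 'k' (b :: rest) := by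
      apply pvRep_skip
      by_cases hb : b = 'h'
      · exact Or.inl (hbh hb).1
      · exact Or.inr (by simp [hb])
    have hhd1 : (pvRep 'c' 'k' (b :: rest)).head? = some 'h' → b = 'h' := by
      intro h; have := pvRep_head 'c' 'k' (by decide) _ h; simpa using this
    have h2 : pvRep 't' 't' (a :: pvRep 'c' 'k' (b :: rest))
        = a :: pvRep 't' 't' (pvRep 'c' 'k' (b :: rest)) := by
      apply pvRep_skip
      by_cases hhd : (pvRep 'c' 'k' (b :: rest)).head? = some 'h'
      · exact Or.inl (hbh (hhd1 hhd)).2.1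
      · exact Or.inr hhd
    have hhd2 : (pvRep 't' 't' (pvRep 'c' 'k' (b :: rest))).head? = some 'h' → b = 'h' := by
      intro h; exact hhd1 (pvRep_head 't' 't' (by decide) _ h)
    have h3 : pvRep 'p' 'p' (a :: pvRep 't' 't' (pvRep 'c' 'k' (b :: rest)))
        = a :: pvRep 'p' 'p' (pvRep 't' 't' (pvRep 'c' 'k' (b :: rest))) := by
      apply pvRep_skip
      by_cases hhd : (pvRep 't' 't' (pvRep 'c' 'k' (b :: rest))).head? = some 'h'
      · exact Or.inl (hbh (hhd2 hhd)).2.2.1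
      · exact Or.inr hhd
    have hhd3 : (pvRep 'p' 'p' (pvRep 't' 't' (pvRep 'c' 'k' (b :: rest)))).head? = some 'h' → b = 'h' := by
      intro h; exact hhd2 (pvRep_head 'p' 'p' (by decide) _ h)
    have h4 : pvRep 'j' 'j' (a :: pvRep 'p' 'p' (pvRep 't' 't' (pvRep 'c' 'k' (b :: rest))))
        = a :: pvRep 'j' 'j' (pvRep 'p' 'p' (pvRep 't' 't' (pvRep 'c' 'k' (b :: rest)))) := by
      apply pvRep_skip
      by_cases hhd : (pvRep 'p' 'p' (pvRep 't' 't' (pvRep 'c' 'k' (b :: rest)))).head? = some 'h'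
      · exact Or.inl (hbh (hhd3 hhd)).2.2.2
      · exact Or.inr hhd
    rw [h1, h2, h3, h4, ih]

-- ===== VERDICT (by name: the statement is the Claim_ definition above) =====
theorem generate_phonetic_nicknames_spec : Claim_equal_generate_phonetic_nicknames := by
  intro token _
  unfold Spec_generate_phonetic_nicknames generate_phonetic_nicknames generate_phonetic_nicknames_alt
  simp only [pvPhoneticSubs, List.foldl_cons, List.foldl_nil, pvGuard_eq_pvRep, pvChain_eq_pvScan]
  simp [PySem.Set.add, PySem.Set.ofList, PySem.Set.empty]
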